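-- pv_equiv track=rewrite | github.com/gillianroberts1/weekend1_homework | start_point/advanced_logic_exercise.py | sum_except67
-- ===== SOURCE A (Python) =====
-- def sum_except67(numbers):
--     # tracking the index and total
--     index = 0
--     total = 0
--
--     while index < len(numbers):
--         if numbers[index] == 6:
--             # this starts at the next index and then stop once reached the end of the list
--             for index in range(index + 1, len(numbers)): # start index +1, stop at length of list in this case index 10
--                 if numbers[index] == 7:
--                     break
--         else:
--             total += numbers[index]
--
--         index += 1
--
--     return total
-- ===== SOURCE B (Python) =====
-- def sum_except67(numbers):
--     total = 0
--     skipping = False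
--     for x in numbers:
--         if skipping:
--             if x == 7:
--                 skipping = False
--         elif x == 6:
--             skipping = True
--         else:
--             total += x
--     return total
-- ===== Notes on version B (the rewrite author's own statement) =====
-- stated objective: idiomatic
-- what changed: Replaced A's while-loop with index jumping via an inner for/break scan by a single flat for-loop over the elements maintaining a boolean skipping flag.
import Mathlib
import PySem

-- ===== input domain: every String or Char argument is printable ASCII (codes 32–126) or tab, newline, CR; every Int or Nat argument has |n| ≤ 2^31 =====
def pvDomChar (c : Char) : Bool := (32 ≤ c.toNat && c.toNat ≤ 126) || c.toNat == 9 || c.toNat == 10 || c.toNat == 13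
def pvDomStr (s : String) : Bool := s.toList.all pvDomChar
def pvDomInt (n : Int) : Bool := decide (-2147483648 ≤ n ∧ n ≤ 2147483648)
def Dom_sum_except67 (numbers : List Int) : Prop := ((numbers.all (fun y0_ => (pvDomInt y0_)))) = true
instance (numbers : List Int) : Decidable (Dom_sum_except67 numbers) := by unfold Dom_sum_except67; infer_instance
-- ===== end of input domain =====

-- B: single flat pass with a boolean skipping flag instead of A's index-jumping while loop (idiomatic; return value only, A does not mutate).
-- ===== PORT A =====
-- inner 'for index in range(index+1, len)' loop: returns the final value of index
-- (break index on the first 7, else the last index of the range; init if the range is empty).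
def innerA (numbers : List Int) : List Nat → Nat → Nat
  | [], idx => idx
  | j :: rest, _ => if numbers.getD j 0 = 7 then j else innerA numbers rest j

-- termination helper for loopA (cited by decreasing_by)
theorem innerA_ge (numbers : List Int) : ∀ (n s p : Nat), p ≤ s → p ≤ innerA numbers (List.range' s n) p := by
  intro n
  induction n with
  | zero => intro s p h; simpa [innerA] using Nat.le_refl p
  | succ k ih =>
    intro s p h
    simp only [List.range']
    simp only [innerA]
    split
    · exact h
    · exact Nat.le_trans h (ih (s+1) s (Nat.le_succ s))

-- the while loop; numbers.getD index 0 is exact for Python's numbers[index] since index < len here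
def loopA (numbers : List Int) (index : Nat) (total : Int) : Int :=
  if h : index < numbers.length then
    if numbers.getD index 0 = 6 then
      loopA numbers (innerA numbers (List.range' (index+1) (numbers.length - (index+1))) index + 1) total
    else
      loopA numbers (index + 1) (total + numbers.getD index 0)
  else total
termination_by numbers.length - index
decreasing_by
  · have := innerA_ge numbers (numbers.length - (index+1)) (index+1) index (Nat.le_succ index); omega
  · omega

def sum_except67 (numbers : List Int) : Int := loopA numbers 0 0

-- ===== PORT B =====
def goB : List Int → Bool → Int → Int
  | [], _, total => total
  | x :: rest, skipping, total =>
    if skipping then goB rest (if x = 7 then false else true) total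
    else if x = 6 then goB rest true total
    else goB rest false (total + x)

def sum_except67_alt (numbers : List Int) : Int := goB numbers false 0

-- ===== PRECONDITION & SPEC =====
def Spec_sum_except67 (numbers : List Int) (out : Int) : Prop := out = sum_except67_alt numbers
instance (numbers : List Int) (out : Int) : Decidable (Spec_sum_except67 numbers out) := by unfold Spec_sum_except67; infer_instance

-- ===== CLAIM (what is proved, stated in full; the proofs are below) =====
def Claim_equal_sum_except67 : Prop := ∀ (numbers : List Int), Dom_sum_except67 numbers → Spec_sum_except67 numbers (sum_except67 numbers)

-- ===== LEMMAS AND PROOFS =====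
-- the inner 7-scan of A matches B's skipping=true state
theorem skip_eq (numbers : List Int) : ∀ (m i p : Nat) (total : Int), m = numbers.length - i → p + 1 = i →
    goB (numbers.drop i) true total
      = goB (numbers.drop (innerA numbers (List.range' i (numbers.length - i)) p + 1)) false total := by
  intro m
  induction m with
  | zero =>
    intro i p total hm hp
    have hle : numbers.length ≤ i := by omega
    have h0 : numbers.length - i = 0 := by omega
    simp [h0, List.range', innerA, hp, List.drop_eq_nil_of_le hle, goB]
  | succ k ih =>
    intro i p total hm hp
    have hi : i < numbers.length := by omega
    have hr : numbers.length - i = (numbers.length - (i+1)) + 1 := by omega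
    have hdrop : numbers.drop i = numbers.getD i 0 :: numbers.drop (i+1) := by
      rw [List.getD_eq_getElem numbers 0 hi]
      exact (List.drop_eq_getElem_cons hi)
    rw [hr, hdrop]
    simp only [List.range', innerA, goB, List.getD]
    by_cases h7 : numbers[i]?.getD 0 = 7
    · simp [h7]
    · simp only [h7, if_false, if_true]
      exact ih (i+1) i total (by omega) rfl

theorem loopA_eq (numbers : List Int) : ∀ (m index : Nat) (total : Int), m = numbers.length - index →
    loopA numbers index total = goB (numbers.drop index) false total := by
  intro m
  induction m using Nat.strong_induction_on with
  | _ m ih =>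
    intro index total hm
    by_cases h : index < numbers.length
    · have hdrop : numbers.drop index = numbers.getD index 0 :: numbers.drop (index+1) := by
        rw [List.getD_eq_getElem numbers 0 h]
        exact (List.drop_eq_getElem_cons h)
      by_cases h6 : numbers.getD index 0 = 6
      · rw [loopA]
        simp only [h, dif_pos, h6, if_pos]
        set j := innerA numbers (List.range' (index+1) (numbers.length - (index+1))) index with hj
        have hge : index ≤ j := innerA_ge numbers _ _ _ (Nat.le_succ index)
        rw [ih (numbers.length - (j+1)) (by omega) (j+1) total rfl]
        rw [hdrop]
        simp only [goB, h6, if_pos, Bool.false_eq_true, if_false]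
        exact (skip_eq numbers (numbers.length - (index+1)) (index+1) index total rfl rfl).symm
      · rw [loopA]
        simp only [h, dif_pos, h6, if_neg, if_false]
        rw [ih (numbers.length - (index+1)) (by omega) (index+1) (total + numbers.getD index 0) rfl]
        rw [hdrop]
        have h6' : ¬ numbers[index]?.getD 0 = 6 := by simpa [List.getD] using h6
        simp [goB, h6', List.getD]
    · rw [loopA]
      simp [h, List.drop_eq_nil_of_le (by omega : numbers.length ≤ index), goB]

-- ===== VERDICT (by name: the statement is the Claim_ definition above) =====
theorem sum_except67_spec : Claim_equal_sum_except67 := by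
  intro numbers _
  unfold Spec_sum_except67 sum_except67 sum_except67_alt
  simpa using loopA_eq numbers (numbers.length) 0 0 (by omega)
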